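-- pv_equiv track=rewrite | github.com/hecunjie/verl | examples/entropy_ce/sentence_stop_utils.py | _first_english_bang_question_end
-- ===== SOURCE A (Python) =====
-- def _first_english_bang_question_end(s: str) -> int | None:
--     """首个 ``!`` / ``?``（跳过下标 0，避免 ``!Hello`` 类开头误断）。"""
--     for i, ch in enumerate(s):
--         if ch not in "!?":
--             continue
--         if i == 0:
--             continue
--         return i + 1
--     return None
-- ===== SOURCE B (Python) =====
-- def _first_english_bang_question_end(s: str) -> int | None:
--     p1 = s.find('!', 1)
--     p2 = s.find('?', 1)
--     if p1 == -1 and p2 == -1: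
--         return None
--     if p1 == -1:
--         return p2 + 1
--     if p2 == -1:
--         return p1 + 1
--     return min(p1, p2) + 1
-- ===== Notes on version B (the rewrite author's own statement) =====
-- stated objective: idiomatic
-- what changed: Replaces the hand-written enumerate loop over every character with two str.find calls starting at offset 1 (one per sentinel character) whose -1 results are reduced with min.
import Mathlib
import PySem

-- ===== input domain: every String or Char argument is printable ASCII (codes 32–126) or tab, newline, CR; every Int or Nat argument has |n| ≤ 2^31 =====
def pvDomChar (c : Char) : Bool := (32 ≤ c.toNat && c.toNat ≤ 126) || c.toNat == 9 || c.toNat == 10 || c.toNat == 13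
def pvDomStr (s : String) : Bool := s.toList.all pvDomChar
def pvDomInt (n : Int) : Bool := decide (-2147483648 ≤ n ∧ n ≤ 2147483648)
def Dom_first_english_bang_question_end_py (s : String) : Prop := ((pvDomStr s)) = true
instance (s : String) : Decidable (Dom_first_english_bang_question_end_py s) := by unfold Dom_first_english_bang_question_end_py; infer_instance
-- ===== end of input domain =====

-- B replaces A's single enumerate loop by two str.find calls from offset 1 reduced with min (idiomatic).

-- ===== PORT A =====
-- the enumerate loop: index i and current character, branches in A's order
def pvGoA : List Char → Nat → Option Int
  | [], _ => none
  | ch :: rest, i =>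
    if ¬ (ch == '!' || ch == '?') = true then pvGoA rest (i + 1)   -- ch not in "!?": continue
    else if i = 0 then pvGoA rest (i + 1)                          -- i == 0: continue
    else some ((i : Int) + 1)                                      -- return i + 1

def first_english_bang_question_end_py (s : String) : Option Int :=
  pvGoA s.toList 0

-- ===== PORT B =====
def first_english_bang_question_end_py_alt (s : String) : Option Int :=
  let p1 := PySem.Str.findFrom s "!" 1 none
  let p2 := PySem.Str.findFrom s "?" 1 none
  if p1 = -1 ∧ p2 = -1 then none
  else if p1 = -1 then some (p2 + 1)
  else if p2 = -1 then some (p1 + 1)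
  else some (min p1 p2 + 1)

-- ===== PRECONDITION & SPEC =====
def Spec_first_english_bang_question_end_py (s : String) (out : Option Int) : Prop := out = first_english_bang_question_end_py_alt s
instance (s : String) (out : Option Int) : Decidable (Spec_first_english_bang_question_end_py s out) := by unfold Spec_first_english_bang_question_end_py; infer_instance

-- ===== CLAIM (what is proved, stated in full; the proofs are below) =====
def Claim_equal_first_english_bang_question_end_py : Prop := ∀ (s : String), Dom_first_english_bang_question_end_py s → Spec_first_english_bang_question_end_py s (first_english_bang_question_end_py s)

-- ===== LEMMAS AND PROOFS =====

-- first index of the single character c, -1 if absent (proof-side mirror of str.find for a 1-char needle)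
def pvFidx (c : Char) : List Char → Int
  | [] => -1
  | a :: r => if a = c then 0 else (if pvFidx c r = -1 then -1 else pvFidx c r + 1)

theorem pvFidx_ge (c : Char) (t : List Char) : -1 ≤ pvFidx c t := by
  induction t with
  | nil => simp [pvFidx]
  | cons a r ih => simp only [pvFidx]; split_ifs <;> omega

theorem pvFidx_eq_neg_one_iff (c : Char) (t : List Char) : pvFidx c t = -1 ↔ c ∉ t := by
  induction t with
  | nil => simp [pvFidx]
  | cons a r ih =>
    by_cases h1 : a = c
    · simp [pvFidx, h1]
    · by_cases h2 : pvFidx c r = -1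
      · simp [pvFidx, h1, h2, ih.mp h2, Ne.symm h1]
      · have hge := pvFidx_ge c r
        have hmem : c ∈ r := by by_contra hc; exact h2 (ih.mpr hc)
        simp only [pvFidx, if_neg h1, if_neg h2, List.mem_cons]
        constructor
        · intro h; omega
        · intro h; exact absurd (Or.inr hmem) h

theorem pvFidx_get (c : Char) (t : List Char) (h : pvFidx c t ≠ -1) :
    t[(pvFidx c t).toNat]? = some c := by
  induction t with
  | nil => simp [pvFidx] at h
  | cons a r ih =>
    by_cases h1 : a = c
    · simp [pvFidx, h1]
    · have h2 : pvFidx c r ≠ -1 := by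
        intro hc; exact h (by simp [pvFidx, if_neg h1, hc])
      have hge := pvFidx_ge c r
      simp only [pvFidx, if_neg h1, if_neg h2]
      have hn : (pvFidx c r + 1).toNat = (pvFidx c r).toNat + 1 := by omega
      rw [hn]
      simpa using ih h2

theorem pvFidx_min (c : Char) (t : List Char) (h : pvFidx c t ≠ -1) :
    ∀ i < (pvFidx c t).toNat, t[i]? ≠ some c := by
  induction t with
  | nil => simp [pvFidx] at h
  | cons a r ih =>
    by_cases h1 : a = c
    · simp [pvFidx, h1]
    · have h2 : pvFidx c r ≠ -1 := by
        intro hc; exact h (by simp [pvFidx, if_neg h1, hc])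
      have hge := pvFidx_ge c r
      simp only [pvFidx, if_neg h1, if_neg h2]
      have hn : (pvFidx c r + 1).toNat = (pvFidx c r).toNat + 1 := by omega
      rw [hn]
      intro i hi
      cases i with
      | zero => simpa using h1
      | succ j => simpa using ih h2 j (by omega)

-- [c] is a prefix of t.drop j iff t[j]? = some c
theorem pvSingleton_prefix_drop (c : Char) (t : List Char) (j : Nat) :
    [c] <+: t.drop j ↔ t[j]? = some c := by
  have h0 : [c] <+: t.drop j ↔ (t.drop j)[0]? = some c := by
    constructor
    · rintro ⟨u, hu⟩; rw [← hu]; rfl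
    · intro h
      cases hd : t.drop j with
      | nil => simp [hd] at h
      | cons x u =>
        rw [hd] at h; simp at h
        exact ⟨u, by simp [h]⟩
  rw [h0, List.getElem?_drop]
  norm_num

theorem pvMem_iff_infix_singleton (c : Char) (t : List Char) : [c] <:+: t ↔ c ∈ t := by
  constructor
  · intro h; exact (List.singleton_sublist.mp h.sublist)
  · intro h
    obtain ⟨u, v, huv⟩ := List.append_of_mem h
    exact ⟨u, v, by simp [huv]⟩

-- str.find with a single-character needle is pvFidx
theorem pvFind_single (c : Char) (t : List Char) : PySem.Chars.find t [c] = pvFidx c t := by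
  by_cases hm : c ∈ t
  · have hinf : [c] <:+: t := (pvMem_iff_infix_singleton c t).mpr hm
    have hnn : 0 ≤ PySem.Chars.find t [c] := (PySem.Chars.find_nonneg_iff t [c]).mpr hinf
    have hf : pvFidx c t ≠ -1 := fun h => ((pvFidx_eq_neg_one_iff c t).mp h) hm
    have hfge : -1 ≤ pvFidx c t := pvFidx_ge c t
    obtain ⟨hpre, hmin⟩ := PySem.Chars.find_spec (s := t) (sub := [c]) hnn
    have hget : t[(PySem.Chars.find t [c]).toNat]? = some c :=
      (pvSingleton_prefix_drop c t _).mp hpre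
    have hget' := pvFidx_get c t hf
    have hmin' := pvFidx_min c t hf
    have heq : (PySem.Chars.find t [c]).toNat = (pvFidx c t).toNat := by
      rcases Nat.lt_trichotomy (PySem.Chars.find t [c]).toNat (pvFidx c t).toNat with h | h | h
      · exact absurd hget (hmin' _ h)
      · exact h
      · exact absurd ((pvSingleton_prefix_drop c t _).mpr hget') (hmin _ h)
    omega
  · have hni : ¬ [c] <:+: t := fun h => hm ((pvMem_iff_infix_singleton c t).mp h)
    rw [(PySem.Chars.find_eq_neg_one_iff t [c]).mpr hni,
        (pvFidx_eq_neg_one_iff c t).mpr hm]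

-- the -1/min reduction of B, on two already shifted positions
def pvComb (a b : Int) : Option Int :=
  if a = -1 ∧ b = -1 then none
  else if a = -1 then some (b + 1)
  else if b = -1 then some (a + 1)
  else some (min a b + 1)

-- shift a 0-based index in the tail to a position in the whole string offset by i (-1 stays -1)
def pvShk (i : Nat) (x : Int) : Int := if x = -1 then -1 else x + i

theorem pvComb_bang (i : Nat) (hi : 1 ≤ i) (b : Int) (hb : -1 ≤ b) :
    pvComb (pvShk i 0) (pvShk i (if b = -1 then -1 else b + 1)) = some ((i : Int) + 1) := by
  unfold pvComb pvShk
  split_ifs <;> first | rfl | (exfalso; omega) | (simp only [Option.some.injEq]; omega)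

theorem pvComb_quest (i : Nat) (hi : 1 ≤ i) (a : Int) (ha : -1 ≤ a) :
    pvComb (pvShk i (if a = -1 then -1 else a + 1)) (pvShk i 0) = some ((i : Int) + 1) := by
  unfold pvComb pvShk
  split_ifs <;> first | rfl | (exfalso; omega) | (simp only [Option.some.injEq]; omega)

theorem pvComb_step (i : Nat) (hi : 1 ≤ i) (a b : Int) (ha : -1 ≤ a) (hb : -1 ≤ b) :
    pvComb (pvShk (i + 1) a) (pvShk (i + 1) b)
      = pvComb (pvShk i (if a = -1 then -1 else a + 1)) (pvShk i (if b = -1 then -1 else b + 1)) := by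
  unfold pvComb pvShk
  split_ifs <;> first | rfl | (exfalso; omega) | (simp only [Option.some.injEq]; omega)

-- the loop from index i ≥ 1 equals the shifted two-find reduction
theorem pvGoA_comb (cs : List Char) : ∀ i : Nat, 1 ≤ i →
    pvGoA cs i = pvComb (pvShk i (pvFidx '!' cs)) (pvShk i (pvFidx '?' cs)) := by
  induction cs with
  | nil => intro i hi; simp [pvGoA, pvFidx, pvShk, pvComb]
  | cons c r ih =>
    intro i hi
    have hge1 := pvFidx_ge '!' r
    have hge2 := pvFidx_ge '?' r
    by_cases h1 : c = '!'
    · subst h1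
      have hA : pvGoA ('!' :: r) i = some ((i : Int) + 1) := by
        simp only [pvGoA]
        rw [if_neg (by decide), if_neg (by omega)]
      have e1 : pvFidx '!' ('!' :: r) = 0 := by simp [pvFidx]
      have e2 : pvFidx '?' ('!' :: r) = if pvFidx '?' r = -1 then -1 else pvFidx '?' r + 1 := by
        simp [pvFidx]
      rw [hA, e1, e2, (pvComb_bang i hi (pvFidx '?' r) hge2).symm]
    · by_cases h2 : c = '?'
      · subst h2
        have hA : pvGoA ('?' :: r) i = some ((i : Int) + 1) := by
          simp only [pvGoA]
          rw [if_neg (by decide), if_neg (by omega)]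
        have e1 : pvFidx '!' ('?' :: r) = if pvFidx '!' r = -1 then -1 else pvFidx '!' r + 1 := by
          simp [pvFidx]
        have e2 : pvFidx '?' ('?' :: r) = 0 := by simp [pvFidx]
        rw [hA, e1, e2, (pvComb_quest i hi (pvFidx '!' r) hge1).symm]
      · have hA : pvGoA (c :: r) i = pvGoA r (i + 1) := by
          simp only [pvGoA]
          rw [if_pos (by simp [h1, h2])]
        have e1 : pvFidx '!' (c :: r) = if pvFidx '!' r = -1 then -1 else pvFidx '!' r + 1 := by
          simp [pvFidx, h1]
        have e2 : pvFidx '?' (c :: r) = if pvFidx '?' r = -1 then -1 else pvFidx '?' r + 1 := by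
          simp [pvFidx, h2]
        rw [hA, ih (i + 1) (by omega), e1, e2, pvComb_step i hi _ _ hge1 hge2]

-- main equivalence, at the level of the character list
theorem pvMainList (t : List Char) :
    pvGoA t 0 = pvComb (PySem.Chars.findFrom t ['!'] 1 none) (PySem.Chars.findFrom t ['?'] 1 none) := by
  cases t with
  | nil => decide
  | cons c cs =>
    have hlen : 1 ≤ (c :: cs).length := by simp
    have hf1 := PySem.Chars.findFrom_natCast (c :: cs) ['!'] 1 hlen
    have hf2 := PySem.Chars.findFrom_natCast (c :: cs) ['?'] 1 hlen
    simp only [List.drop_one, List.tail_cons, Nat.cast_one] at hf1 hf2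
    rw [hf1, hf2, pvFind_single, pvFind_single]
    have h0 : pvGoA (c :: cs) 0 = pvGoA cs 1 := by
      simp [pvGoA]
    rw [h0, pvGoA_comb cs 1 (le_refl 1)]
    have hs1 : pvShk 1 (pvFidx '!' cs) = (if pvFidx '!' cs = -1 then -1 else 1 + pvFidx '!' cs) := by
      simp only [pvShk]; split_ifs <;> [rfl; (push_cast; omega)]
    have hs2 : pvShk 1 (pvFidx '?' cs) = (if pvFidx '?' cs = -1 then -1 else 1 + pvFidx '?' cs) := by
      simp only [pvShk]; split_ifs <;> [rfl; (push_cast; omega)]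
    rw [hs1, hs2]

-- ===== VERDICT (by name: the statement is the Claim_ definition above) =====
theorem first_english_bang_question_end_py_spec : Claim_equal_first_english_bang_question_end_py := by
  intro s _
  unfold Spec_first_english_bang_question_end_py first_english_bang_question_end_py first_english_bang_question_end_py_alt
  have h1 : PySem.Str.findFrom s "!" 1 none = PySem.Chars.findFrom s.toList ['!'] 1 none := by
    rw [PySem.Str.findFrom_eq]; rfl
  have h2 : PySem.Str.findFrom s "?" 1 none = PySem.Chars.findFrom s.toList ['?'] 1 none := by
    rw [PySem.Str.findFrom_eq]; rfl
  simp only [h1, h2]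
  exact pvMainList s.toList
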